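-- pv_equiv track=rewrite | github.com/Pedro-UwU/SIA_2Q2021 | TP4/Kohonen/Graph.py | grid_for_graph
-- ===== SOURCE A (Python) =====
-- def grid_for_graph(original_grid):
--     size = len(original_grid)
--     grid = [None] * size
--     for y in range(size):
--         grid[y] = []
--         aux = size - y - 1
--         for x in range(size):
--             grid[y].append(original_grid[x][aux])
--
--     return grid
-- ===== SOURCE B (Python) =====
-- def grid_for_graph(original_grid):
--     n = len(original_grid)
--     rows = [list(r[:n]) for r in original_grid]
--     out = []
--     for _ in range(n):
--         out.append([r.pop() for r in rows])
--     return out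
-- ===== Notes on version B (the rewrite author's own statement) =====
-- stated objective: alternative
-- what changed: A computes each rotated cell by index arithmetic (grid[y][x] = original[x][size-y-1]) in a nested read-only loop; B trims rows to the square window into mutable copies and then destructively peels the grid, popping the last element of every row n times so each peel yields one rotated row and the data is consumed as it goes.
import Mathlib
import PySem

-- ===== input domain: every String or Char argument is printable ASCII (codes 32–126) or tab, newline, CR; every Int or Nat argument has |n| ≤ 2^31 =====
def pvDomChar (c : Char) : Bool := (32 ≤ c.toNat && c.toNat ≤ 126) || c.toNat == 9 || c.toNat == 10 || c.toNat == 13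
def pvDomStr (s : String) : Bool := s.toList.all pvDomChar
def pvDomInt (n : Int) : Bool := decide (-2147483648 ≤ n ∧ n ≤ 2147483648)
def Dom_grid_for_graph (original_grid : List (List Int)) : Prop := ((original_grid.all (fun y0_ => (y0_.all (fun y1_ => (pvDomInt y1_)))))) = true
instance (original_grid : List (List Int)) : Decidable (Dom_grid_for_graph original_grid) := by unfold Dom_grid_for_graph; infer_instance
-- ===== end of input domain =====

-- B replaces A's read-only index-arithmetic nested loop by destructive peeling: trim rows to the square window, then pop the last element of every row n times, each peel producing one rotated row (alternative decomposition; same return value wherever A returns).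


-- ===== PORT A =====
def grid_for_graph (original_grid : List (List Int)) : List (List Int) :=
  let size : Int := (original_grid.length : Int)
  (PySem.List.pyRange 0 size 1).map (fun y =>
    let aux := size - y - 1
    (PySem.List.pyRange 0 size 1).map (fun x =>
      PySem.List.pyGetD (PySem.List.pyGetD original_grid x []) aux 0))

-- ===== PORT B =====
-- the peeling loop: k times, emit the last element of every row (Python's r.pop();
-- getLastD 0 — Pre_ guarantees the rows are never empty) and drop it from each row
def pvPeel : Nat → List (List Int) → List (List Int)
  | 0, _ => []
  | k + 1, rows => (rows.map (fun r => r.getLastD 0)) :: pvPeel k (rows.map (fun r => r.dropLast))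

def grid_for_graph_alt (original_grid : List (List Int)) : List (List Int) :=
  let n := original_grid.length
  let rows := original_grid.map (fun r => PySem.List.slice r none (some (n : Int)))
  pvPeel n rows

-- ===== PRECONDITION & SPEC =====
-- Pre_ excludes exactly the inputs where A raises IndexError: a row shorter than the grid's height.
def Pre_grid_for_graph (original_grid : List (List Int)) : Prop :=
  ∀ row ∈ original_grid, original_grid.length ≤ row.length
instance (original_grid : List (List Int)) : Decidable (Pre_grid_for_graph original_grid) := by
  unfold Pre_grid_for_graph; infer_instance
def pvWitness_grid_for_graph : List (List Int) := [[1, 2], [3, 4]]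

def Spec_grid_for_graph (original_grid : List (List Int)) (out : List (List Int)) : Prop :=
  out = grid_for_graph_alt original_grid
instance (original_grid : List (List Int)) (out : List (List Int)) : Decidable (Spec_grid_for_graph original_grid out) := by
  unfold Spec_grid_for_graph; infer_instance

-- ===== CLAIM =====
def Claim_equal_grid_for_graph : Prop := ∀ (original_grid : List (List Int)), Dom_grid_for_graph original_grid → Pre_grid_for_graph original_grid → Spec_grid_for_graph original_grid (grid_for_graph original_grid)

-- ===== LEMMAS AND PROOFS =====

lemma getLastD_eq_getD (r : List Int) (n : Nat) (h : r.length = n + 1) :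
    r.getLastD 0 = r.getD n 0 := by
  rw [List.getLastD_eq_getLast?, List.getLast?_eq_getElem?, h]
  simp [List.getD_eq_getElem?_getD]

lemma getD_dropLast (r : List Int) (i : Nat) (h : i < r.length - 1) :
    r.dropLast.getD i 0 = r.getD i 0 := by
  rw [List.getD_eq_getElem?_getD, List.getD_eq_getElem?_getD,
    List.getElem?_eq_getElem (by simpa using h), List.getElem?_eq_getElem (by omega),
    List.getElem_dropLast]

-- with k ≤ n peels of rows all of length n, peel y is row r ↦ r[n-1-y]
lemma pvPeel_eq (k : Nat) : ∀ (n : Nat) (rows : List (List Int)), k ≤ n →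
    (∀ r ∈ rows, r.length = n) →
    pvPeel k rows = (List.range k).map (fun y => rows.map (fun r => r.getD (n - 1 - y) 0)) := by
  induction k with
  | zero => intro n rows _ _; rfl
  | succ k ih =>
    intro n rows hk hlen
    obtain ⟨m, rfl⟩ : ∃ m, n = m + 1 := ⟨n - 1, by omega⟩
    rw [pvPeel, ih m (rows.map (fun r => r.dropLast)) (by omega)
      (by intro r hr; rcases List.mem_map.mp hr with ⟨s, hs, rfl⟩
          simp [List.length_dropLast, hlen s hs]),
      List.range_succ_eq_map, List.map_cons, List.map_map]
    congr 1
    · simp only [Nat.sub_zero]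
      exact List.map_congr_left (fun r hr => getLastD_eq_getD r m (hlen r hr))
    · apply List.map_congr_left
      intro y hy
      have hyk : y < k := List.mem_range.mp hy
      simp only [Function.comp_def, List.map_map]
      apply List.map_congr_left
      intro r hr
      have hr1 : r.length = m + 1 := hlen r hr
      have hym : y < m := by omega
      have hm : m + 1 - 1 - y.succ = m - 1 - y := by omega
      rw [hm]
      exact getD_dropLast r (m - 1 - y) (by omega)

-- a map over a list as a map over its index range
lemma map_eq_map_range (f : List Int → Int) (xs : List (List Int)) :
    xs.map f = (List.range xs.length).map (fun k => f (xs.getD k [])) := by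
  apply List.ext_getElem
  · simp
  · intro i h1 h2
    simp [List.getD_eq_getElem?_getD, List.getElem?_eq_getElem (by simpa using h2)]

-- ===== VERDICT =====
theorem grid_for_graph_spec : Claim_equal_grid_for_graph := by
  intro G _ hpre
  simp only [Spec_grid_for_graph, grid_for_graph, grid_for_graph_alt]
  set n : Nat := G.length with hn
  have hsq : ∀ row ∈ G, PySem.List.slice row none (some ((n : Nat) : Int)) = row.take n :=
    fun row _ => PySem.List.slice_to_natCast row n
  set sq : List (List Int) := G.map (fun row => PySem.List.slice row none (some ((n : Nat) : Int))) with hsqdef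
  have hsqlen : ∀ r ∈ sq, r.length = n := by
    intro r hr
    rcases List.mem_map.mp hr with ⟨s, hs, rfl⟩
    rw [hsq s hs]
    simp only [List.length_take]
    exact Nat.min_eq_left (hpre s hs)
  rw [pvPeel_eq n n sq le_rfl hsqlen]
  apply List.ext_getElem
  · simp [PySem.List.length_pyRange_one]
  · intro y hy1 hy2
    have hyn : y < n := by simpa [PySem.List.length_pyRange_one] using hy1
    simp only [List.getElem_map, PySem.List.getElem_pyRange_one, List.getElem_range]
    have haux : (n : Int) - (0 + (y : Int)) - 1 = ((n - 1 - y : Nat) : Int) := by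
      push_cast [Nat.sub_sub]; omega
    rw [haux, PySem.List.pyRange_one, List.map_map, hsqdef, List.map_map,
      map_eq_map_range ((fun r => r.getD (n - 1 - y) 0) ∘
        (fun row => PySem.List.slice row none (some ((n : Nat) : Int)))) G]
    have hcnt : ((n : Int) - 0).toNat = n := by simp
    rw [hcnt, ← hn]
    apply List.map_congr_left
    intro k hk
    have hkn : k < n := List.mem_range.mp hk
    simp only [Function.comp_def]
    rw [show ((0 : Int) + (k : Int)) = ((k : Nat) : Int) by ring,
      PySem.List.pyGetD_natCast, PySem.List.pyGetD_natCast]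
    have hrow : G.getD k [] = G[k] := by
      rw [List.getD_eq_getElem?_getD, List.getElem?_eq_getElem (by omega)]; rfl
    rw [hrow, hsq G[k] (List.getElem_mem _)]
    have hc : n - 1 - y < n := by omega
    rw [List.getD_eq_getElem?_getD, List.getD_eq_getElem?_getD, List.getElem?_take]
    simp [hc]
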